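-- pv_equiv track=rewrite | github.com/AsselK1/ows-assignment | src/api/server.py | _parse_csv_or_multi
-- ===== SOURCE A (Python) =====
-- def _parse_csv_or_multi(values: list[str] | None) -> list[str] | None:
--     if not values:
--         return None
--     expanded: list[str] = []
--     for item in values:
--         for part in str(item).split(","):
--             candidate = part.strip()
--             if candidate:
--                 expanded.append(candidate)
--     return expanded or None
-- ===== SOURCE B (Python) =====
-- def _parse_csv_or_multi(values):
--     if not values:
--         return None
--     expanded = []
--     for item in values:
--         buf = []
--         for ch in str(item):
--             if ch == ',':
--                 tok = ''.join(buf).strip()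
--                 if tok:
--                     expanded.append(tok)
--                 buf = []
--             else:
--                 buf.append(ch)
--         tok = ''.join(buf).strip()
--         if tok:
--             expanded.append(tok)
--     return expanded or None
-- ===== Notes on version B (the rewrite author's own statement) =====
-- stated objective: alternative
-- what changed: Replaces str.split-based parsing with a character-level tokenizer: a single scan over each item's characters maintaining a buffer, flushing (strip + append if non-empty) on each comma and at end of item, so no split list is ever materialised.
import Mathlib
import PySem

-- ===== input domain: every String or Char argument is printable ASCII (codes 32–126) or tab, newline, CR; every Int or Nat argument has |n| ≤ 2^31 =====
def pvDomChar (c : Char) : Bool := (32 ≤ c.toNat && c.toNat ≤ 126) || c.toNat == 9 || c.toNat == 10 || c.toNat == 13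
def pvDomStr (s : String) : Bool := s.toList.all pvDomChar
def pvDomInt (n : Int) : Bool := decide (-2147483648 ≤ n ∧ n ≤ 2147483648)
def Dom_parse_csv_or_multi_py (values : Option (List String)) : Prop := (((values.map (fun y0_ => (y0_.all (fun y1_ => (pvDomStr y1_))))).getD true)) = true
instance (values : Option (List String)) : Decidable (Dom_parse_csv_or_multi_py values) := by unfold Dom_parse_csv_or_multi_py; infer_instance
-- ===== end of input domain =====

-- B replaces A's str.split-based parsing by a character-level tokenizer (buffer + flush on
-- comma / end of item); alternative decomposition, same cost.

-- s.split(",") — Python str.split with the literal nonempty separator "," (exact: PySem.Chars.splitOn)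
def pySplitComma (s : String) : List String :=
  (PySem.Chars.splitOn s.toList [',']).map String.ofList

-- ===== PORT A =====
def parse_csv_or_multi_py (values : Option (List String)) : Option (List String) :=
  match values with
  | none => none
  | some vs =>
    if vs = [] then none
    else
      let expanded : List String := vs.foldl (fun acc item =>
        (pySplitComma item).foldl (fun acc part =>
          let candidate := PySem.Str.strip part
          if candidate ≠ "" then acc ++ [candidate] else acc) acc) []
      if expanded = [] then none else some expanded

-- ===== PORT B =====
-- tok = ''.join(buf).strip(); if tok: expanded.append(tok)
def pvFlush (expanded : List String) (buf : List Char) : List String :=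
  let tok := PySem.Str.strip (String.ofList buf)
  if tok ≠ "" then expanded ++ [tok] else expanded

-- one character of B's inner loop: flush on ',', otherwise push onto the buffer
def pvStep (st : List String × List Char) (ch : Char) : List String × List Char :=
  if ch = ',' then (pvFlush st.1 st.2, []) else (st.1, st.2 ++ [ch])

-- B's body for one item: scan its characters, then the final flush
def pvItemLoop (acc : List String) (item : String) : List String :=
  let st := item.toList.foldl pvStep (acc, [])
  pvFlush st.1 st.2

def parse_csv_or_multi_py_alt (values : Option (List String)) : Option (List String) :=
  match values with
  | none => none
  | some vs =>
    if vs = [] then none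
    else
      let expanded : List String := vs.foldl pvItemLoop []
      if expanded = [] then none else some expanded

-- ===== PRECONDITION & SPEC =====
def Spec_parse_csv_or_multi_py (values : Option (List String)) (out : Option (List String)) : Prop := out = parse_csv_or_multi_py_alt values
instance (values : Option (List String)) (out : Option (List String)) : Decidable (Spec_parse_csv_or_multi_py values out) := by unfold Spec_parse_csv_or_multi_py; infer_instance

-- ===== CLAIM (what is proved, stated in full; the proofs are below) =====
def Claim_equal_parse_csv_or_multi_py : Prop := ∀ (values : Option (List String)), Dom_parse_csv_or_multi_py values → Spec_parse_csv_or_multi_py values (parse_csv_or_multi_py values)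

-- ===== LEMMAS AND PROOFS =====

-- clean recursive characterisation of splitting on a single comma
def splitOnC : List Char → List (List Char)
  | [] => [[]]
  | c :: rest => if c = ',' then [] :: splitOnC rest else (splitOnC rest).modifyHead (c :: ·)

theorem splitOnC_ne_nil (l : List Char) : splitOnC l ≠ [] := by
  cases l with
  | nil => simp [splitOnC]
  | cons c rest =>
    simp only [splitOnC]
    split_ifs
    · simp
    · rcases h : splitOnC rest with _ | ⟨a, t⟩
      · exact absurd h (splitOnC_ne_nil rest)
      · simp

theorem splitOn_go_eq (fuel : Nat) (l cur : List Char) (acc : List (List Char))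
    (h : l.length < fuel) :
    PySem.Chars.splitOn.go [','] fuel l cur acc
      = acc.reverse ++ (splitOnC l).modifyHead (cur.reverse ++ ·) := by
  induction fuel generalizing l cur acc with
  | zero => omega
  | succ n ih =>
    cases l with
    | nil =>
      simp [PySem.Chars.splitOn.go, splitOnC]
    | cons c rest =>
      by_cases hc : c = ','
      · subst hc
        have hpre : List.isPrefixOf [','] (',' :: rest) = true := by
          simp [List.isPrefixOf]
        simp only [PySem.Chars.splitOn.go, hpre, if_true]
        rw [show List.drop [','].length (',' :: rest) = rest from rfl]
        rw [ih rest [] (cur.reverse :: acc) (by simpa using Nat.lt_of_succ_lt_succ h)]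
        simp only [splitOnC, List.modifyHead, List.reverse_cons, List.reverse_nil,
          List.nil_append, List.append_assoc, List.cons_append]
        rcases hr : splitOnC rest with _ | ⟨a, t'⟩
        · exact absurd hr (splitOnC_ne_nil rest)
        · simp
      · have hpre : List.isPrefixOf [','] (c :: rest) = false := by
          simp [List.isPrefixOf]
          exact fun h' => hc h'.symm
        simp only [PySem.Chars.splitOn.go]
        rw [if_neg (by simp [hpre])]
        rw [ih rest (c :: cur) acc (by simpa using Nat.lt_of_succ_lt_succ h)]
        rcases hr : splitOnC rest with _ | ⟨a, t⟩
        · exact absurd hr (splitOnC_ne_nil rest)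
        · simp [splitOnC, hc, hr]

theorem splitOn_comma_eq (s : List Char) :
    PySem.Chars.splitOn s [','] = splitOnC s := by
  unfold PySem.Chars.splitOn
  rw [splitOn_go_eq (s.length + 1) s [] [] (Nat.lt_succ_self _)]
  rcases h : splitOnC s with _ | ⟨a, t⟩
  · exact absurd h (splitOnC_ne_nil s)
  · simp

-- A's inner loop is an append of the stripped non-empty parts
theorem inner_foldl_eq (parts : List String) (acc : List String) :
    parts.foldl (fun acc part =>
        let candidate := PySem.Str.strip part
        if candidate ≠ "" then acc ++ [candidate] else acc) acc
      = acc ++ (parts.map PySem.Str.strip).filter (fun c => c ≠ "") := by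
  induction parts generalizing acc with
  | nil => simp
  | cons p t ih =>
    rw [List.foldl_cons, ih]
    by_cases h : PySem.Str.strip p = ""
    · simp [h]
    · simp [h]

-- B's scan over the characters of l started with buffer buf, followed by the final flush,
-- appends exactly the stripped non-empty parts of (splitOnC l) with buf glued onto the head
theorem scan_eq (l : List Char) (buf : List Char) (acc : List String) :
    pvFlush (l.foldl pvStep (acc, buf)).1 (l.foldl pvStep (acc, buf)).2
      = acc ++ (((splitOnC l).modifyHead (buf ++ ·)).map
          (fun p => PySem.Str.strip (String.ofList p))).filter (fun c => c ≠ "") := by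
  induction l generalizing buf acc with
  | nil =>
    simp only [List.foldl_nil, splitOnC, List.modifyHead, List.append_nil, List.map_cons,
      List.map_nil, pvFlush]
    by_cases h : PySem.Str.strip (String.ofList buf) = ""
    · simp [h]
    · simp [h]
  | cons c rest ih =>
    by_cases hc : c = ','
    · subst hc
      simp only [List.foldl_cons, pvStep, reduceIte]
      rw [ih [] (pvFlush acc buf)]
      have hmod : (splitOnC rest).modifyHead (([] : List Char) ++ ·) = splitOnC rest := by
        rcases h : splitOnC rest with _ | ⟨a, t⟩ <;> simp
      rw [hmod]
      simp only [splitOnC, reduceIte, List.modifyHead, List.append_nil, List.map_cons, pvFlush]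
      by_cases h : PySem.Str.strip (String.ofList buf) = ""
      · simp [h]
      · simp [h]
    · simp only [List.foldl_cons, pvStep, if_neg hc]
      rw [ih (buf ++ [c]) acc]
      have : (splitOnC (c :: rest)).modifyHead (buf ++ ·)
          = (splitOnC rest).modifyHead ((buf ++ [c]) ++ ·) := by
        simp only [splitOnC, if_neg hc]
        rcases h : splitOnC rest with _ | ⟨a, t⟩
        · exact absurd h (splitOnC_ne_nil rest)
        · simp
      rw [this]

-- per item, B's scan agrees with A's inner loop
theorem item_eq (item : String) (acc : List String) :
    pvItemLoop acc item
      = (pySplitComma item).foldl (fun acc part =>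
          let candidate := PySem.Str.strip part
          if candidate ≠ "" then acc ++ [candidate] else acc) acc := by
  show pvFlush (item.toList.foldl pvStep (acc, [])).1 (item.toList.foldl pvStep (acc, [])).2 = _
  rw [scan_eq, inner_foldl_eq]
  have hmod : (splitOnC item.toList).modifyHead (([] : List Char) ++ ·) = splitOnC item.toList := by
    rcases h : splitOnC item.toList with _ | ⟨a, t⟩ <;> simp
  rw [hmod]
  unfold pySplitComma
  rw [splitOn_comma_eq]
  simp [List.map_map, Function.comp_def]

theorem outer_eq (ws : List String) (acc : List String) :
    ws.foldl pvItemLoop acc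
      = ws.foldl (fun acc item =>
          (pySplitComma item).foldl (fun acc part =>
            let candidate := PySem.Str.strip part
            if candidate ≠ "" then acc ++ [candidate] else acc) acc) acc := by
  induction ws generalizing acc with
  | nil => simp only [List.foldl_nil]
  | cons w tw ihw =>
    simp only [List.foldl_cons]
    rw [item_eq]
    exact ihw _

-- ===== VERDICT (by name: the statement is the Claim_ definition above) =====
theorem parse_csv_or_multi_py_spec : Claim_equal_parse_csv_or_multi_py := by
  intro values _
  unfold Spec_parse_csv_or_multi_py parse_csv_or_multi_py parse_csv_or_multi_py_alt
  cases values with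
  | none => rfl
  | some vs =>
    cases vs with
    | nil => simp
    | cons v t =>
      simp only [reduceCtorEq, if_false]
      rw [outer_eq]
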